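-- pv_equiv track=rewrite | github.com/bongG-moon/0412_langflow_test | langflow_v2/24_normalize_answer_text.py | _metric_column
-- ===== SOURCE A (Python) =====
-- from typing import Any, Dict
--
-- def _metric_column(rows: list[Dict[str, Any]]) -> str:
--     if not rows:
--         return ""
--     columns = set(str(column) for row in rows for column in row.keys())
--     for column in ("production", "target", "achievement_rate", "wip_qty", "hold_qty", "scrap_qty", "defect_qty", "yield_rate", "utilization_rate"):
--         if column in columns:
--             return column
--     return ""
-- ===== SOURCE B (Python) =====
-- from typing import Any, Dict
--
-- _PRIORITIES = ("production", "target", "achievement_rate", "wip_qty", "hold_qty", "scrap_qty", "defect_qty", "yield_rate", "utilization_rate")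
-- _RANK = {name: i for i, name in enumerate(_PRIORITIES)}
--
-- def _metric_column(rows: list[Dict[str, Any]]) -> str:
--     # single pass over the data: keep the best (smallest) priority rank seen
--     n = len(_PRIORITIES)
--     best = n
--     for row in rows:
--         for k in row.keys():
--             r = _RANK.get(str(k), n)
--             if r < best:
--                 best = r
--     return _PRIORITIES[best] if best < n else ""
-- ===== Notes on version B (the rewrite author's own statement) =====
-- stated objective: alternative
-- what changed: B replaces A's candidate loop over the priority tuple (with a precomputed set of column names) by a single pass over the rows' keys that tracks the minimum priority rank via a name-to-rank dict, indexing the priority tuple at the end.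
import Mathlib
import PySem

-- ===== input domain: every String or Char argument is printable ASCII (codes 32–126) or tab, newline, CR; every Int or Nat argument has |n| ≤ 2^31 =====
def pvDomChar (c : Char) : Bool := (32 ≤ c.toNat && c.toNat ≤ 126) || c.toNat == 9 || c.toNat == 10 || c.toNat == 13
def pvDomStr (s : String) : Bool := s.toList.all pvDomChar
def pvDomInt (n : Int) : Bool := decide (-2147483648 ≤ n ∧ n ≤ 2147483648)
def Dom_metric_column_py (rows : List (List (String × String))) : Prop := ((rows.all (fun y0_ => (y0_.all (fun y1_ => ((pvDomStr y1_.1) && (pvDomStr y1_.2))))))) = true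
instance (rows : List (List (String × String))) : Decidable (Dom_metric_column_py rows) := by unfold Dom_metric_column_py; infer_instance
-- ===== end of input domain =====

-- B replaces the candidate loop over the priority tuple by a single pass over the
-- rows' keys tracking the minimum priority rank (same cost, different algorithm).

-- ===== PORT A =====
def pvPriorities : List String :=
  ["production", "target", "achievement_rate", "wip_qty", "hold_qty", "scrap_qty", "defect_qty", "yield_rate", "utilization_rate"]

-- A's 'for column in (...): if column in columns: return column' loop
def pvALoop (columns : PySem.Set String) : List String → String
  | [] => ""
  | c :: rest => if columns.contains c then c else pvALoop columns rest

def metric_column_py (rows : List (List (String × String))) : String :=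
  if rows = [] then ""
  else
    -- str(column) on a string key is the key itself
    let columns : PySem.Set String :=
      PySem.Set.ofList (rows.flatMap (fun row => (PySem.Dict.keys (PySem.Dict.mk row))))
    pvALoop columns pvPriorities

-- ===== PORT B =====
-- _RANK = {name: i for i, name in enumerate(_PRIORITIES)}
def pvRankDict : PySem.Dict String Nat := PySem.Dict.mk pvPriorities.zipIdx

def metric_column_py_alt (rows : List (List (String × String))) : String :=
  let n := pvPriorities.length
  let best :=
    rows.foldl (fun best row =>
      (PySem.Dict.keys (PySem.Dict.mk row)).foldl (fun best k =>
        let r := PySem.Dict.getD pvRankDict k n   -- str(k) on a string key is the key itself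
        if r < best then r else best) best) n
  if best < n then pvPriorities.getD best "" else ""

-- ===== PRECONDITION & SPEC =====
def Spec_metric_column_py (rows : List (List (String × String))) (out : String) : Prop := out = metric_column_py_alt rows
instance (rows : List (List (String × String))) (out : String) : Decidable (Spec_metric_column_py rows out) := by unfold Spec_metric_column_py; infer_instance

-- ===== CLAIM (what is proved, stated in full; the proofs are below) =====
def Claim_equal_metric_column_py : Prop := ∀ (rows : List (List (String × String))), Dom_metric_column_py rows → Spec_metric_column_py rows (metric_column_py rows)

-- ===== LEMMAS AND PROOFS =====

-- the rank function B looks up per key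
def pvRho (k : String) : Nat := PySem.Dict.getD pvRankDict k 9

-- all keys of all rows, in order
def pvKeys (rows : List (List (String × String))) : List String :=
  rows.flatMap (fun row => PySem.Dict.keys (PySem.Dict.mk row))

theorem pvRho_getD : ∀ i < 9, pvRho (pvPriorities.getD i "") = i := by decide

theorem pvRho_lt (k : String) (h : pvRho k < 9) : pvPriorities.getD (pvRho k) "" = k := by
  unfold pvRho pvRankDict pvPriorities at h ⊢
  simp only [List.zipIdx, PySem.Dict.getD, PySem.Dict.get?_mk_cons] at h ⊢
  split_ifs at h ⊢ <;> simp_all <;> simp [PySem.Dict.get?] at h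

theorem pv_contains_iff (keys : List String) (c : String) :
    (PySem.Set.ofList keys).contains c = true ↔ c ∈ keys := by
  simp [PySem.Set.contains, PySem.Set.mem_ofList]

theorem pv_foldl_flat {α γ : Type} (g : α → List String) (f : γ → String → γ)
    (rows : List α) (init : γ) :
    rows.foldl (fun acc r => (g r).foldl f acc) init = (rows.flatMap g).foldl f init := by
  induction rows generalizing init with
  | nil => rfl
  | cons r rest ih => simp [List.flatMap_cons, List.foldl_append, ih]

theorem pv_foldl_ifmin (f : String → Nat) (l : List String) (a : Nat) :
    l.foldl (fun b k => if f k < b then f k else b) a = (l.map f).foldl min a := by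
  induction l generalizing a with
  | nil => rfl
  | cons k rest ih =>
    simp only [List.foldl_cons, List.map_cons, ih]
    congr 1
    split_ifs <;> omega

theorem pvALoop_drop (keys : List String) (m : Nat) (hm9 : m ≤ 9)
    (hin : m < 9 → pvPriorities.getD m "" ∈ keys)
    (hlow : ∀ j, j < m → pvPriorities.getD j "" ∉ keys) :
    ∀ d j, 9 - j = d → j ≤ 9 → j ≤ m →
      pvALoop (PySem.Set.ofList keys) (pvPriorities.drop j)
        = if m < 9 then pvPriorities.getD m "" else "" := by
  intro d
  induction d with
  | zero =>
    intro j hd hj9 hjm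
    have hj : j = 9 := by omega
    have hm : m = 9 := by omega
    subst hj
    simp [hm, pvALoop, show pvPriorities.drop 9 = [] from rfl]
  | succ d ih =>
    intro j hd hj9 hjm
    have hjlt : j < 9 := by omega
    have hlen : j < pvPriorities.length := by simpa [pvPriorities] using hjlt
    rw [List.drop_eq_getElem_cons hlen, pvALoop]
    by_cases hc : (PySem.Set.ofList keys).contains pvPriorities[j] = true
    · have hmem : pvPriorities.getD j "" ∈ keys := by
        rw [List.getD_eq_getElem _ _ hlen]
        exact (pv_contains_iff keys _).1 hc
      have hjm' : ¬ j < m := fun h => hlow j h hmem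
      have hmj : m = j := by omega
      subst hmj
      have hmemE : pvPriorities[m] ∈ keys := by
        rwa [List.getD_eq_getElem _ _ hlen] at hmem
      simp [hmemE, hjlt, List.getElem?_eq_getElem hlen]
    · have hcE : pvPriorities[j] ∉ keys := fun h => hc ((pv_contains_iff keys _).2 h)
      have hne : m ≠ j := by
        intro h
        subst h
        have hmem := hin hjlt
        rw [List.getD_eq_getElem _ _ hlen] at hmem
        exact hcE hmem
      have := ih (j + 1) (by omega) (by omega) (by omega)
      simp [hcE, this]

theorem metric_column_py_alt_eval (rows : List (List (String × String))) :
    metric_column_py_alt rows =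
      (if ((pvKeys rows).map pvRho).foldl min 9 < 9
       then pvPriorities.getD (((pvKeys rows).map pvRho).foldl min 9) "" else "") := by
  unfold metric_column_py_alt pvKeys
  have hlen : pvPriorities.length = 9 := rfl
  simp only [hlen]
  rw [pv_foldl_flat (fun row => PySem.Dict.keys (PySem.Dict.mk row))
      (fun best k => if PySem.Dict.getD pvRankDict k 9 < best then PySem.Dict.getD pvRankDict k 9 else best)]
  rw [pv_foldl_ifmin (fun k => PySem.Dict.getD pvRankDict k 9)]
  rfl

-- ===== VERDICT (by name: the statement is the Claim_ definition above) =====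
theorem metric_column_py_spec : Claim_equal_metric_column_py := by
  intro rows _
  unfold Spec_metric_column_py
  rw [metric_column_py_alt_eval]
  unfold metric_column_py
  by_cases hrows : rows = []
  · subst hrows; decide
  · simp only [hrows, if_false]
    set m := ((pvKeys rows).map pvRho).foldl min 9 with hm
    have hle := PySem.List.foldl_min_le ((pvKeys rows).map pvRho) 9
    have hmem := PySem.List.foldl_min_mem ((pvKeys rows).map pvRho) 9
    have hm9 : m ≤ 9 := hle.1
    have hin : m < 9 → pvPriorities.getD m "" ∈ pvKeys rows := by
      intro hlt
      rcases hmem with h9 | hin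
      · omega
      · rcases List.mem_map.1 hin with ⟨k, hk, hρ⟩
        have := pvRho_lt k (by rw [hρ]; exact hlt)
        rw [hρ] at this
        rwa [this]
    have hlow : ∀ j, j < m → pvPriorities.getD j "" ∉ pvKeys rows := by
      intro j hj hmemj
      have hρ : pvRho (pvPriorities.getD j "") = j := pvRho_getD j (by omega)
      have : m ≤ pvRho (pvPriorities.getD j "") :=
        hle.2 _ (List.mem_map.2 ⟨_, hmemj, rfl⟩)
      omega
    have := pvALoop_drop (pvKeys rows) m hm9 hin hlow 9 0 rfl (by omega) (by omega)
    simpa [pvKeys] using this
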